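-- pv_equiv track=rewrite | github.com/PyEdoardo/codigos-aulas | codigos-Aulas-Robson/Dia-13-05-2024/atividade-1/funcs.py | procData
-- ===== SOURCE A (Python) =====
-- def procData(data, usuarios):
--     dictData = {}
--     for key in usuarios:
--         if data not in usuarios[key]['ultimo_acesso']:
--             return 'Não existe essa data!'
--         elif data == usuarios[key]['ultimo_acesso']:
--             dictData[key] = {'nome' : usuarios[key]['nome'], 'ultimo_acesso' : usuarios[key]['ultimo_acesso'], 'id_maquina' : usuarios[key]['id_maquina']}
--     return dictData
-- ===== SOURCE B (Python) =====
-- def procData(data, usuarios):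
--     if any(data not in usuarios[key]['ultimo_acesso'] for key in usuarios):
--         return 'Não existe essa data!'
--     return {key: {'nome': info['nome'],
--                   'ultimo_acesso': info['ultimo_acesso'],
--                   'id_maquina': info['id_maquina']}
--             for key, info in usuarios.items() if info['ultimo_acesso'] == data}
-- ===== Notes on version B (the rewrite author's own statement) =====
-- stated objective: simpler
-- what changed: A interleaves validation and result-building in one loop with an early return discarding the partial dict; B splits the work into a short-circuiting any() validation pass followed by a dict comprehension that filters the matching users; B returns the identical error string on the not-found branch, which lies outside Pre_ only because a str cannot inhabit the Lean return type List (String x ...), not because the behaviours differ.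
import Mathlib
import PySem

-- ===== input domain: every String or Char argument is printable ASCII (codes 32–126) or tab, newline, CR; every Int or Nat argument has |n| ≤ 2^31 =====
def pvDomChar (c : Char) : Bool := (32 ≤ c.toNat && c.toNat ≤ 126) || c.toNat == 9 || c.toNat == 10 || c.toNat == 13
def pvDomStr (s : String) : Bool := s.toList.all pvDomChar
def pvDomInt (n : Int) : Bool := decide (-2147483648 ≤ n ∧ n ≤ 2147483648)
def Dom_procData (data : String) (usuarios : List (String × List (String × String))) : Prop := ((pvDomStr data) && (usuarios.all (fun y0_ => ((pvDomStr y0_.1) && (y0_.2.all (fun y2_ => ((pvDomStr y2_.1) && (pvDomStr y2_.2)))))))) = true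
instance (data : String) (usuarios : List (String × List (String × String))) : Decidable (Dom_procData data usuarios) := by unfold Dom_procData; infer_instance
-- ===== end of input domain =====

-- B replaces A's single build-or-bail loop by a validation pass followed by a filtering
-- comprehension (different decomposition; same cost). B returns A's exact error string on
-- the not-found branch in Python; that branch is excluded here only because a str cannot
-- inhabit the required Lean return type. Equivalence is about the return value.

-- ===== PORT A =====
-- A's loop: the early `return 'Não existe essa data!'` (a str, not a dict) and any KeyError
-- are modeled as `none`; both are excluded by Pre_procData, and `procData` maps `none` to [].
def procDataLoop (data : String) :
    List (String × List (String × String)) → List (String × List (String × String)) →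
    Option (List (String × List (String × String)))
  | [], acc => some acc
  | (k, u) :: rest, acc =>
    match (PySem.Dict.mk u).get? "ultimo_acesso" with
    | none => none  -- KeyError
    | some ua =>
      if !(PySem.Str.isIn data ua) then none  -- return 'Não existe essa data!'
      else if data = ua then
        match (PySem.Dict.mk u).get? "nome", (PySem.Dict.mk u).get? "id_maquina" with
        | some n, some m =>
            procDataLoop data rest (acc ++ [(k, [("nome", n), ("ultimo_acesso", ua), ("id_maquina", m)])])
        | _, _ => none  -- KeyError
      else procDataLoop data rest acc

def procData (data : String) (usuarios : List (String × List (String × String))) : List (String × List (String × String)) :=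
  (procDataLoop data usuarios []).getD []

-- ===== PORT B =====
-- B's validation pass: `any(data not in u['ultimo_acesso'] ...)` (missing key → invalid; excluded by Pre_)
def pvCheckUA (data : String) (u : List (String × String)) : Bool :=
  match (PySem.Dict.mk u).get? "ultimo_acesso" with
  | some ua => PySem.Str.isIn data ua
  | none => false

-- B's comprehension body for one entry (KeyError on 'nome'/'id_maquina' → none; excluded by Pre_)
def pvBuild (data : String) (p : String × List (String × String)) : Option (String × List (String × String)) :=
  if (PySem.Dict.mk p.2).get? "ultimo_acesso" = some data then
    match (PySem.Dict.mk p.2).get? "nome", (PySem.Dict.mk p.2).get? "id_maquina" with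
    | some n, some m => some (p.1, [("nome", n), ("ultimo_acesso", data), ("id_maquina", m)])
    | _, _ => none
  else none

def procData_alt (data : String) (usuarios : List (String × List (String × String))) : List (String × List (String × String)) :=
  if usuarios.all (fun p => pvCheckUA data p.2) then usuarios.filterMap (pvBuild data)
  else []  -- in Python B returns the same string 'Não existe essa data!' as A here (outside Pre_)

-- ===== PRECONDITION & SPEC =====
-- one entry is admissible: it has 'ultimo_acesso', data is a substring of it, and if it
-- equals data the entry also has 'nome' and 'id_maquina' (else A raises KeyError)
def pvEntryOk (data : String) (u : List (String × String)) : Bool :=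
  match (PySem.Dict.mk u).get? "ultimo_acesso" with
  | none => false
  | some ua =>
    PySem.Str.isIn data ua &&
      (ua != data || (((PySem.Dict.mk u).get? "nome").isSome && ((PySem.Dict.mk u).get? "id_maquina").isSome))

-- Pre_ excludes: (a) inputs where some entry's 'ultimo_acesso' does not contain data — there A
-- returns the STRING 'Não existe essa data!', which is not a value of the required return type
-- List (String × …) and so cannot even be stated here; Python B returns the identical string on
-- exactly those inputs (see the cites), so nothing behavioural is being dodged; (b) inputs where
-- A raises KeyError ('ultimo_acesso' missing, or 'nome'/'id_maquina' missing on a matching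
-- entry); (c) association lists with duplicate keys, which no Python dict can produce.
def Pre_procData (data : String) (usuarios : List (String × List (String × String))) : Prop :=
  (usuarios.map Prod.fst).Nodup ∧ (∀ p ∈ usuarios, (p.2.map Prod.fst).Nodup) ∧
  usuarios.all (fun p => pvEntryOk data p.2) = true
instance (data : String) (usuarios : List (String × List (String × String))) : Decidable (Pre_procData data usuarios) := by unfold Pre_procData; infer_instance

def pvWitness_procData : String × (List (String × List (String × String))) :=
  ("d", [("u", [("nome", "n"), ("ultimo_acesso", "d"), ("id_maquina", "m")])])

def Spec_procData (data : String) (usuarios : List (String × List (String × String))) (out : List (String × List (String × String))) : Prop := out = procData_alt data usuarios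
instance (data : String) (usuarios : List (String × List (String × String))) (out : List (String × List (String × String))) : Decidable (Spec_procData data usuarios out) := by unfold Spec_procData; infer_instance

-- ===== CLAIM (what is proved, stated in full; the proofs are below) =====
def Claim_equal_procData : Prop := ∀ (data : String) (usuarios : List (String × List (String × String))), Dom_procData data usuarios → Pre_procData data usuarios → Spec_procData data usuarios (procData data usuarios)

-- ===== LEMMAS AND PROOFS =====
lemma procDataLoop_spec (data : String) :
    ∀ (us : List (String × List (String × String))) (acc : List (String × List (String × String))),
      us.all (fun p => pvEntryOk data p.2) = true →
      procDataLoop data us acc = some (acc ++ us.filterMap (pvBuild data)) := by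
  intro us
  induction us with
  | nil => intro acc _; simp [procDataLoop]
  | cons p rest ih =>
    intro acc hall
    obtain ⟨k, u⟩ := p
    simp only [List.all_cons, Bool.and_eq_true] at hall
    obtain ⟨hok, hrest⟩ := hall
    unfold pvEntryOk at hok
    cases hget : (PySem.Dict.mk u).get? "ultimo_acesso" with
    | none => simp [hget] at hok
    | some ua =>
      rw [hget] at hok
      simp only [Bool.and_eq_true, Bool.or_eq_true, bne_iff_ne, ne_eq] at hok
      obtain ⟨hin, hkeys⟩ := hok
      have hin' : PySem.Chars.isIn data.toList ua.toList = true := by simpa using hin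
      by_cases heq : data = ua
      · subst heq
        rcases hkeys with h | ⟨hn, hm⟩
        · exact absurd rfl h
        · cases hgn : (PySem.Dict.mk u).get? "nome" with
          | none => rw [hgn] at hn; simp at hn
          | some n =>
            cases hgm : (PySem.Dict.mk u).get? "id_maquina" with
            | none => rw [hgm] at hm; simp at hm
            | some m =>
              have hbuild : pvBuild data (k, u) =
                  some (k, [("nome", n), ("ultimo_acesso", data), ("id_maquina", m)]) := by
                unfold pvBuild
                simp [hget, hgn, hgm]
              have hstep : procDataLoop data ((k, u) :: rest) acc =
                  procDataLoop data rest
                    (acc ++ [(k, [("nome", n), ("ultimo_acesso", data), ("id_maquina", m)])]) := by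
                conv_lhs => unfold procDataLoop
                rw [hget]
                simp [hin', hgn, hgm]
              rw [hstep, ih _ hrest]
              simp [hbuild]
      · have hbuild : pvBuild data (k, u) = none := by
          unfold pvBuild
          have hno : ¬ ((PySem.Dict.mk u).get? "ultimo_acesso" = some data) := by
            rw [hget]; exact fun h => heq (Option.some.inj h).symm
          rw [if_neg hno]
        have hstep : procDataLoop data ((k, u) :: rest) acc = procDataLoop data rest acc := by
          conv_lhs => unfold procDataLoop
          rw [hget]
          simp [hin', heq]
        rw [hstep, ih _ hrest]
        simp [hbuild]

lemma pvEntryOk_check (data : String) (u : List (String × String)) :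
    pvEntryOk data u = true → pvCheckUA data u = true := by
  unfold pvEntryOk pvCheckUA
  cases (PySem.Dict.mk u).get? "ultimo_acesso" with
  | none => simp
  | some ua => simp; intro h _; exact h

-- ===== VERDICT (by name: the statement is the Claim_ definition above) =====
theorem procData_spec : Claim_equal_procData := by
  intro data usuarios _ hpre
  obtain ⟨_, _, hall⟩ := hpre
  unfold Spec_procData procData procData_alt
  have hvalid : usuarios.all (fun p => pvCheckUA data p.2) = true := by
    rw [List.all_eq_true] at hall ⊢
    exact fun p hp => pvEntryOk_check data p.2 (hall p hp)
  rw [procDataLoop_spec data usuarios [] hall, hvalid]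
  simp
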